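-- pv_equiv track=rewrite | github.com/lukacslacko/csaszar | neighborly.py | vertex_link_is_disk
-- ===== SOURCE A (Python) =====
-- def vertex_link_is_disk(vertex, faces_containing):
--     if not faces_containing:
--         return False
--     link_edges, link_verts = [], set()
--     for face in faces_containing:
--         opp = [x for x in face if x != vertex]
--         link_edges.append(tuple(sorted(opp)))
--         link_verts.update(opp)
--     deg = {v: 0 for v in link_verts}
--     for (a, b) in link_edges:
--         deg[a] += 1; deg[b] += 1
--     if any(d != 2 for d in deg.values()):
--         return False
--     adj = {v: [] for v in link_verts}
--     for (a, b) in link_edges: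
--         adj[a].append(b); adj[b].append(a)
--     start = next(iter(link_verts))
--     seen = {start}; stack = [start]
--     while stack:
--         u = stack.pop()
--         for w in adj[u]:
--             if w not in seen:
--                 seen.add(w); stack.append(w)
--     return len(seen) == len(link_verts)
-- ===== SOURCE B (Python) =====
-- def vertex_link_is_disk(vertex, faces_containing):
--     if not faces_containing:
--         return False
--     edges = [tuple(sorted(x for x in face if x != vertex)) for face in faces_containing]
--     verts = {v for a, b in edges for v in (a, b)}
--     if any(sum(1 for a, b in edges for x in (a, b) if x == v) != 2 for v in verts):
--         return False
--     comp = {edges[0][0]}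
--     while True:
--         grown = comp | {v for a, b in edges if a in comp or b in comp for v in (a, b)}
--         if grown == comp:
--             return len(comp) == len(verts)
--         comp = grown
-- ===== Notes on version B (the rewrite author's own statement) =====
-- stated objective: idiomatic
-- what changed: Replaces the degree dict and the explicit adjacency-list + stack DFS with comprehensions plus a fixpoint closure over the edge list (repeatedly absorb endpoints of edges touching the component until it stops growing), checking connectivity without building an adjacency structure.
import Mathlib
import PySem

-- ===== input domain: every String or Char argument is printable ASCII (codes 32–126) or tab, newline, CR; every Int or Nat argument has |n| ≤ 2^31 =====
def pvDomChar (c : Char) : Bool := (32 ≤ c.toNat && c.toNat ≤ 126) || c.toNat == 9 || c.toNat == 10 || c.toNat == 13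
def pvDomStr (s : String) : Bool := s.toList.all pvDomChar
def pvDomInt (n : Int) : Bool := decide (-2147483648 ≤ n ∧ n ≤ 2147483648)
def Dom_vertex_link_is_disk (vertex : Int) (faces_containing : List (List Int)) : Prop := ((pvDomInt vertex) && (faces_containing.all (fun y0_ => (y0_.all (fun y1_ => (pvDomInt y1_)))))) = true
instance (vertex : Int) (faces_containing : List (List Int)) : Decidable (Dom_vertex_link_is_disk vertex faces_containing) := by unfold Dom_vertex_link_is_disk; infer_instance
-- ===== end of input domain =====

-- B replaces A's degree dictionary and adjacency-list stack DFS by comprehension-style counting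
-- and a fixpoint closure over the edge list (objective: more idiomatic; not claimed faster).

-- ===== PORT A =====
-- tuple(sorted(x for x in face if x != vertex)) — appears verbatim in both Python sources;
-- under Pre_ the sorted list has exactly two elements, read off as the pair
def pvLinkEdge (vertex : Int) (face : List Int) : Int × Int :=
  let so := PySem.List.sorted (face.filter (fun x => x != vertex)) (fun x => x) false
  (so.headD 0, so.tail.headD 0)

-- A's `while stack:` DFS loop (head of the list = top of the Python stack; neighbours are pushed
-- so that the last one appended is popped first, exactly as in Python).  fuel = number of link
-- vertices, which provably suffices: every push adds a fresh vertex to `seen`.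
def pvDfsA (adj : PySem.Dict Int (List Int)) : Nat → List Int → PySem.Set Int → PySem.Set Int
  | 0, _, seen => seen
  | _ + 1, [], seen => seen
  | fuel + 1, u :: st, seen =>
    let p := (adj.getD u []).foldl
      (fun (p : PySem.Set Int × List Int) w =>
        if p.1.contains w then p else (p.1.add w, w :: p.2)) (seen, st)
    pvDfsA adj fuel p.2 p.1

def vertex_link_is_disk (vertex : Int) (faces_containing : List (List Int)) : Bool :=
  if faces_containing = [] then false
  else
    let s := faces_containing.foldl
      (fun (st : List (Int × Int) × PySem.Set Int) face =>
        (st.1 ++ [pvLinkEdge vertex face], st.2.update (face.filter (fun x => x != vertex))))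
      ([], PySem.Set.empty)
    let link_edges := s.1
    let link_verts := s.2
    let deg := link_edges.foldl
      (fun d e => (d.modify e.1 0 (· + 1)).modify e.2 0 (· + 1))
      (link_verts.foldl (fun d v => d.insert v (0 : Int)) PySem.Dict.empty)
    if deg.values.any (fun d => d != 2) then false
    else
      let adj := link_edges.foldl
        (fun d e => (d.modify e.1 [] (· ++ [e.2])).modify e.2 [] (· ++ [e.1]))
        (link_verts.foldl (fun d v => d.insert v ([] : List Int)) PySem.Dict.empty)
      match link_verts with
      | [] => false  -- unreachable under Pre_ (next(iter(...)) is only taken on a nonempty set)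
      | start :: _ =>
        let seen := pvDfsA adj link_verts.length [start] (PySem.Set.add PySem.Set.empty start)
        decide (seen.length = link_verts.length)

-- ===== PORT B =====
-- one closure round: comp | {v for a, b in edges if a in comp or b in comp for v in (a, b)}
def pvGrow (edges : List (Int × Int)) (comp : PySem.Set Int) : PySem.Set Int :=
  comp.union (PySem.Set.ofList (edges.flatMap
    (fun e => if comp.contains e.1 || comp.contains e.2 then [e.1, e.2] else [])))

-- B's `while True:` loop; fuel = number of link vertices, which provably suffices: every round
-- before the fixpoint strictly grows `comp` inside the vertex set
def pvLoop (edges : List (Int × Int)) : Nat → PySem.Set Int → PySem.Set Int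
  | 0, comp => comp
  | fuel + 1, comp =>
    let grown := pvGrow edges comp
    if PySem.Set.equal grown comp then comp else pvLoop edges fuel grown

def vertex_link_is_disk_alt (vertex : Int) (faces_containing : List (List Int)) : Bool :=
  if faces_containing = [] then false
  else
    let edges := faces_containing.map (fun face => pvLinkEdge vertex face)
    let verts : PySem.Set Int := PySem.Set.ofList (edges.flatMap (fun e => [e.1, e.2]))
    if verts.any (fun v =>
        ((edges.flatMap (fun e => [e.1, e.2])).map (fun x => if x = v then (1 : Int) else 0)).sum != 2)
    then false
    else
      match edges with
      | [] => false  -- unreachable: faces_containing ≠ [] here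
      | e :: _ =>
        let comp := pvLoop edges verts.length (PySem.Set.add PySem.Set.empty e.1)
        decide (comp.length = verts.length)

-- ===== PRECONDITION & SPEC =====
-- Pre_ excludes exactly the inputs on which A raises: if some face has a number of members other
-- than `vertex` different from two, the tuple unpacking `for (a, b) in link_edges` raises
-- ValueError (B's unpacking in its comprehensions fails on the same inputs).
def Pre_vertex_link_is_disk (vertex : Int) (faces_containing : List (List Int)) : Prop :=
  ∀ face ∈ faces_containing, (face.filter (fun x => x != vertex)).length = 2
instance (vertex : Int) (faces_containing : List (List Int)) : Decidable (Pre_vertex_link_is_disk vertex faces_containing) := by unfold Pre_vertex_link_is_disk; infer_instance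

def pvWitness_vertex_link_is_disk : Int × List (List Int) := (0, [[0, 1, 2], [0, 2, 3], [0, 3, 1]])

def Spec_vertex_link_is_disk (vertex : Int) (faces_containing : List (List Int)) (out : Bool) : Prop := out = vertex_link_is_disk_alt vertex faces_containing
instance (vertex : Int) (faces_containing : List (List Int)) (out : Bool) : Decidable (Spec_vertex_link_is_disk vertex faces_containing out) := by unfold Spec_vertex_link_is_disk; infer_instance

-- ===== CLAIM (what is proved, stated in full; the proofs are below) =====
def Claim_equal_vertex_link_is_disk : Prop := ∀ (vertex : Int) (faces_containing : List (List Int)), Dom_vertex_link_is_disk vertex faces_containing → Pre_vertex_link_is_disk vertex faces_containing → Spec_vertex_link_is_disk vertex faces_containing (vertex_link_is_disk vertex faces_containing)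

-- ===== LEMMAS AND PROOFS =====

-- the symmetric link-graph relation both programs explore, as a relation on edge endpoints
def pvAdjP (edges : List (Int × Int)) (u w : Int) : Prop := (u, w) ∈ edges ∨ (w, u) ∈ edges

theorem pvAdjP_symm (edges : List (Int × Int)) : ∀ u w, pvAdjP edges u w → pvAdjP edges w u := by
  intro u w h; unfold pvAdjP at *; tauto

-- membership of the set accumulated by A's `link_verts.update(opp)` loop
theorem pv_mem_foldl_update (faces : List (List Int)) (g : List Int → List Int)
    (s : PySem.Set Int) (x : Int) :
    x ∈ faces.foldl (fun s f => PySem.Set.update s (g f)) s ↔ x ∈ s ∨ ∃ f ∈ faces, x ∈ g f := by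
  induction faces generalizing s with
  | nil => simp
  | cons f fs ih =>
    rw [List.foldl_cons, ih]
    simp [PySem.Set.mem_update, or_assoc]

theorem pv_nodup_foldl_update (faces : List (List Int)) (g : List Int → List Int)
    (s : PySem.Set Int) (hs : s.Nodup) :
    (faces.foldl (fun s f => PySem.Set.update s (g f)) s).Nodup := by
  induction faces generalizing s with
  | nil => exact hs
  | cons f fs ih => exact ih _ (PySem.Set.nodup_update _ _ hs)

-- A's two-modify degree loop is the one-modify loop over the flattened endpoint list
theorem pv_deg_fold_eq (edges : List (Int × Int)) (d : PySem.Dict Int Int) :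
    edges.foldl (fun d e => (d.modify e.1 0 (· + 1)).modify e.2 0 (· + 1)) d
      = (edges.flatMap (fun e => [e.1, e.2])).foldl (fun d x => d.modify x 0 (· + 1)) d := by
  induction edges generalizing d with
  | nil => rfl
  | cons e es ih => simp only [List.foldl_cons, List.flatMap_cons, List.foldl_append]; exact ih _

-- A's two-modify adjacency loop is the one-modify loop over the directed pair list
theorem pv_adj_fold_eq (edges : List (Int × Int)) (d : PySem.Dict Int (List Int)) :
    edges.foldl (fun d e => (d.modify e.1 [] (· ++ [e.2])).modify e.2 [] (· ++ [e.1])) d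
      = (edges.flatMap (fun e => [(e.1, e.2), (e.2, e.1)])).foldl
          (fun d p => d.modify p.1 [] (· ++ [p.2])) d := by
  induction edges generalizing d with
  | nil => rfl
  | cons e es ih => simp only [List.foldl_cons, List.flatMap_cons, List.foldl_append]; exact ih _

-- a dict built by inserting the constant c has getD = c everywhere
theorem pv_getD_foldl_insert_const {ν : Type} (l : List Int) (c : ν) (d : PySem.Dict Int ν)
    (x : Int) (h : d.getD x c = c) :
    (l.foldl (fun d v => d.insert v c) d).getD x c = c := by
  induction l generalizing d with
  | nil => exact h
  | cons v vs ih =>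
    refine ih _ ?_
    rw [PySem.Dict.getD_insert]
    split <;> simp [h]

-- neighbour lists of A's adjacency dict name exactly the link-graph relation
theorem pv_mem_adj (edges : List (Int × Int)) (adj0 : PySem.Dict Int (List Int))
    (h0 : ∀ u, adj0.getD u [] = []) (u w : Int) :
    w ∈ ((edges.flatMap (fun e => [(e.1, e.2), (e.2, e.1)])).foldl
          (fun d p => d.modify p.1 [] (· ++ [p.2])) adj0).getD u []
      ↔ pvAdjP edges u w := by
  rw [PySem.Dict.getD_foldl_modify_append, h0]
  simp only [List.nil_append, List.mem_map, List.mem_filter, List.mem_flatMap, pvAdjP]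
  constructor
  · rintro ⟨p, ⟨⟨e, he, hp⟩, hu⟩, hw⟩
    simp only [List.mem_cons] at hp
    rcases hp with hp | hp | hp
    · subst hp; simp only [beq_iff_eq] at hu; left; rw [← hu, ← hw]; simpa using he
    · subst hp; simp only [beq_iff_eq] at hu; right; rw [← hu, ← hw]; simpa using he
    · exact absurd hp (by simp)
  · rintro (h | h)
    · exact ⟨(u, w), ⟨⟨(u, w), h, by simp⟩, by simp⟩, rfl⟩
    · exact ⟨(u, w), ⟨⟨(w, u), h, by simp⟩, by simp⟩, rfl⟩

-- strictly fewer survivors in a filter once some list member flips from kept to dropped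
theorem pv_filter_le (V : List Int) (p q : Int → Prop) [DecidablePred p] [DecidablePred q]
    (himp : ∀ x, q x → p x) :
    (V.filter (fun x => decide (q x))).length ≤ (V.filter (fun x => decide (p x))).length := by
  induction V with
  | nil => simp
  | cons a V ih =>
    simp only [List.filter_cons]
    by_cases hq : q a
    · rw [if_pos (by simpa using hq), if_pos (by simpa using himp a hq)]
      simpa using ih
    · rw [if_neg (by simpa using hq)]
      by_cases hp : p a
      · rw [if_pos (by simpa using hp)]
        exact Nat.le_succ_of_le ih
      · rw [if_neg (by simpa using hp)]
        exact ih

theorem pv_filter_strict (V : List Int) (p q : Int → Prop) [DecidablePred p] [DecidablePred q]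
    (himp : ∀ x, q x → p x) (w : Int) (hw : w ∈ V) (hp : p w) (hq : ¬ q w) :
    (V.filter (fun x => decide (q x))).length < (V.filter (fun x => decide (p x))).length := by
  induction V with
  | nil => cases hw
  | cons a V ih =>
    simp only [List.filter_cons]
    rcases List.mem_cons.mp hw with rfl | hw'
    · rw [if_neg (by simpa using hq), if_pos (by simpa using hp)]
      exact Nat.lt_succ_of_le (pv_filter_le V p q himp)
    · by_cases hq' : q a
      · rw [if_pos (by simpa using hq'), if_pos (by simpa using himp a hq')]
        simpa using ih hw'
      · rw [if_neg (by simpa using hq')]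
        by_cases hp' : p a
        · rw [if_pos (by simpa using hp')]
          exact Nat.lt_succ_of_lt (ih hw')
        · rw [if_neg (by simpa using hp')]
          exact ih hw'

-- the inner `for w in adj[u]:` loop of A's DFS
theorem pvDfs_fold (ns : List Int) (seen : PySem.Set Int) (st : List Int) (hnd : seen.Nodup) :
    (ns.foldl (fun p w => if p.1.contains w then p else (p.1.add w, w :: p.2)) (seen, st)).1.Nodup
    ∧ (∀ x, x ∈ (ns.foldl (fun p w => if p.1.contains w then p else (p.1.add w, w :: p.2)) (seen, st)).1
          ↔ x ∈ seen ∨ x ∈ ns)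
    ∧ (∀ x, x ∈ (ns.foldl (fun p w => if p.1.contains w then p else (p.1.add w, w :: p.2)) (seen, st)).2
          ↔ x ∈ st ∨ (x ∈ ns ∧ x ∉ seen))
    ∧ ∀ (V : List Int), (∀ w ∈ ns, w ∈ V) →
        (V.filter (fun x => decide (x ∉ (ns.foldl (fun p w => if p.1.contains w then p else (p.1.add w, w :: p.2)) (seen, st)).1))).length
          + (ns.foldl (fun p w => if p.1.contains w then p else (p.1.add w, w :: p.2)) (seen, st)).2.length
          ≤ (V.filter (fun x => decide (x ∉ seen))).length + st.length := by
  induction ns generalizing seen st with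
  | nil => exact ⟨hnd, by simp, by simp, by intro V _; simp⟩
  | cons a ns ih =>
    simp only [List.foldl_cons]
    by_cases ha : a ∈ seen
    · rw [if_pos ((PySem.Set.contains_iff seen a).mpr ha)]
      obtain ⟨h1, h2, h3, h4⟩ := ih seen st hnd
      refine ⟨h1, ?_, ?_, ?_⟩
      · intro x
        rw [h2, List.mem_cons]
        by_cases hxa : x = a
        · subst hxa; simp [ha]
        · simp [hxa]
      · intro x
        rw [h3, List.mem_cons]
        by_cases hxa : x = a
        · subst hxa; simp [ha]
        · simp [hxa]
      · intro V hns
        exact h4 V (fun w hw => hns w (List.mem_cons_of_mem _ hw))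
    · rw [if_neg (by simp [ha])]
      obtain ⟨h1, h2, h3, h4⟩ := ih (seen.add a) (a :: st) (PySem.Set.nodup_add _ _ hnd)
      refine ⟨h1, ?_, ?_, ?_⟩
      · intro x
        rw [h2, PySem.Set.mem_add, List.mem_cons]
        tauto
      · intro x
        rw [h3, PySem.Set.mem_add, List.mem_cons, List.mem_cons]
        by_cases hxa : x = a
        · subst hxa; simp [ha]
        · simp [hxa]
      · intro V hns
        have haV : a ∈ V := hns a (List.mem_cons_self ..)
        have hmem : a ∈ seen.add a := (PySem.Set.mem_add _ _ _).mpr (Or.inr rfl)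
        have step : (V.filter (fun x => decide (x ∉ seen.add a))).length
            < (V.filter (fun x => decide (x ∉ seen))).length := by
          refine pv_filter_strict V (fun x => x ∉ seen) (fun x => x ∉ seen.add a)
            (fun x hx hmem' => hx ((PySem.Set.mem_add _ _ _).mpr (Or.inl hmem'))) a haV ha
            (fun hcon => hcon hmem)
        have h4' := h4 V (fun w hw => hns w (List.mem_cons_of_mem _ hw))
        simp only [List.length_cons] at h4' ⊢
        omega

-- correctness of A's DFS while-loop: with fuel = |V| it computes a saturated set of vertices
-- reachable from `seen`
theorem pvDfsA_spec (adj : PySem.Dict Int (List Int)) (V : List Int)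
    (hAdjV : ∀ u w, w ∈ adj.getD u [] → w ∈ V) :
    ∀ (fuel : Nat) (stack : List Int) (seen : PySem.Set Int),
      seen.Nodup → (∀ x ∈ stack, x ∈ seen) → (∀ x ∈ seen, x ∈ V) →
      (∀ u ∈ seen, u ∉ stack → ∀ w ∈ adj.getD u [], w ∈ seen) →
      (V.filter (fun x => decide (x ∉ seen))).length + stack.length ≤ fuel →
      (∀ x ∈ seen, x ∈ pvDfsA adj fuel stack seen) ∧
      (pvDfsA adj fuel stack seen).Nodup ∧
      (∀ x ∈ pvDfsA adj fuel stack seen, x ∈ V) ∧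
      (∀ x ∈ pvDfsA adj fuel stack seen, ∃ y ∈ seen, Relation.ReflTransGen (fun u w => w ∈ adj.getD u []) y x) ∧
      (∀ u ∈ pvDfsA adj fuel stack seen, ∀ w ∈ adj.getD u [], w ∈ pvDfsA adj fuel stack seen) := by
  intro fuel
  induction fuel with
  | zero =>
    intro stack seen hnd hsub hV hsat hfuel
    have hstack : stack = [] := List.length_eq_zero_iff.mp (by omega)
    subst hstack
    exact ⟨fun x hx => hx, hnd, hV, fun x hx => ⟨x, hx, Relation.ReflTransGen.refl⟩,
      fun u hu w hw => hsat u hu (by simp) w hw⟩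
  | succ fuel ih =>
    intro stack seen hnd hsub hV hsat hfuel
    match stack with
    | [] =>
      exact ⟨fun x hx => hx, hnd, hV, fun x hx => ⟨x, hx, Relation.ReflTransGen.refl⟩,
        fun u hu w hw => hsat u hu (by simp) w hw⟩
    | u :: st =>
      have huseen : u ∈ seen := hsub u (List.mem_cons_self ..)
      obtain ⟨f1, f2, f3, f4⟩ := pvDfs_fold (adj.getD u []) seen st hnd
      show _ ∧ _
      simp only [pvDfsA]
      set p := (adj.getD u []).foldl
        (fun p w => if p.1.contains w then p else (p.1.add w, w :: p.2)) (seen, st) with hp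
      have hsub' : ∀ x ∈ p.2, x ∈ p.1 := by
        intro x hx
        rcases (f3 x).mp hx with h | ⟨h, _⟩
        · exact (f2 x).mpr (Or.inl (hsub x (List.mem_cons_of_mem _ h)))
        · exact (f2 x).mpr (Or.inr h)
      have hV' : ∀ x ∈ p.1, x ∈ V := by
        intro x hx
        rcases (f2 x).mp hx with h | h
        · exact hV x h
        · exact hAdjV u x h
      have hsat' : ∀ u' ∈ p.1, u' ∉ p.2 → ∀ w ∈ adj.getD u' [], w ∈ p.1 := by
        intro u' hu' hnst w hw
        rcases (f2 u').mp hu' with h | h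
        · by_cases huu : u' = u
          · subst huu; exact (f2 w).mpr (Or.inr hw)
          · have : u' ∉ u :: st := by
              intro hmem
              rcases List.mem_cons.mp hmem with h' | h'
              · exact huu h'
              · exact hnst ((f3 u').mpr (Or.inl h'))
            exact (f2 w).mpr (Or.inl (hsat u' h this w hw))
        · by_cases hseen : u' ∈ seen
          · by_cases huu : u' = u
            · subst huu; exact (f2 w).mpr (Or.inr hw)
            · by_cases hst : u' ∈ st
              · exact absurd ((f3 u').mpr (Or.inl hst)) hnst
              · have : u' ∉ u :: st := by
                  intro hmem; rcases List.mem_cons.mp hmem with h' | h' <;> [exact huu h'; exact hst h']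
                exact (f2 w).mpr (Or.inl (hsat u' hseen this w hw))
          · exact absurd ((f3 u').mpr (Or.inr ⟨h, hseen⟩)) hnst
      have hfuel' : (V.filter (fun x => decide (x ∉ p.1))).length + p.2.length ≤ fuel := by
        have := f4 V (fun w hw => hAdjV u w hw)
        simp only [List.length_cons] at hfuel
        omega
      obtain ⟨g1, g2, g3, g4, g5⟩ := ih p.2 p.1 f1 hsub' hV' hsat' hfuel'
      refine ⟨?_, g2, g3, ?_, g5⟩
      · intro x hx; exact g1 x ((f2 x).mpr (Or.inl hx))
      · intro x hx
        obtain ⟨y, hy, hr⟩ := g4 x hx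
        rcases (f2 y).mp hy with h | h
        · exact ⟨y, h, hr⟩
        · exact ⟨u, huseen, Relation.ReflTransGen.head h hr⟩

-- membership of one closure round of B
theorem pv_mem_grow (edges : List (Int × Int)) (comp : PySem.Set Int) (x : Int) :
    x ∈ pvGrow edges comp
      ↔ x ∈ comp ∨ ∃ e ∈ edges, (e.1 ∈ comp ∨ e.2 ∈ comp) ∧ (x = e.1 ∨ x = e.2) := by
  unfold pvGrow
  rw [PySem.Set.mem_union, PySem.Set.mem_ofList, List.mem_flatMap]
  constructor
  · rintro (h | ⟨e, he, hx⟩)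
    · exact Or.inl h
    · by_cases hc : comp.contains e.1 || comp.contains e.2
      · rw [if_pos hc] at hx
        simp only [Bool.or_eq_true, PySem.Set.contains_iff] at hc
        simp only [List.mem_cons, List.not_mem_nil, or_false] at hx
        exact Or.inr ⟨e, he, hc, hx⟩
      · rw [if_neg hc] at hx; cases hx
  · rintro (h | ⟨e, he, hc, hx⟩)
    · exact Or.inl h
    · refine Or.inr ⟨e, he, ?_⟩
      rw [if_pos (by simp only [Bool.or_eq_true, PySem.Set.contains_iff]; exact hc)]
      rcases hx with rfl | rfl <;> simp

theorem pv_nodup_grow (edges : List (Int × Int)) (comp : PySem.Set Int) (h : comp.Nodup) :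
    (pvGrow edges comp).Nodup := PySem.Set.nodup_union _ _ h

-- correctness of B's fixpoint closure loop
theorem pvLoop_spec (edges : List (Int × Int)) (V : List Int)
    (hEnds : ∀ e ∈ edges, e.1 ∈ V ∧ e.2 ∈ V) :
    ∀ (fuel : Nat) (comp : PySem.Set Int),
      comp.Nodup → (∀ x ∈ comp, x ∈ V) →
      (V.filter (fun x => decide (x ∉ comp))).length < fuel →
      (∀ x ∈ comp, x ∈ pvLoop edges fuel comp) ∧
      (pvLoop edges fuel comp).Nodup ∧
      (∀ x ∈ pvLoop edges fuel comp, x ∈ V) ∧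
      (∀ x ∈ pvLoop edges fuel comp, ∃ y ∈ comp, Relation.ReflTransGen (pvAdjP edges) y x) ∧
      (∀ u ∈ pvLoop edges fuel comp, ∀ w, pvAdjP edges u w → w ∈ pvLoop edges fuel comp) := by
  intro fuel
  induction fuel with
  | zero => intro comp _ _ hfuel; omega
  | succ fuel ih =>
    intro comp hnd hV hfuel
    show _ ∧ _
    simp only [pvLoop]
    by_cases heq : PySem.Set.equal (pvGrow edges comp) comp
    · rw [if_pos heq]
      have hmem := (PySem.Set.equal_iff _ _).mp heq
      refine ⟨fun x hx => hx, hnd, hV, fun x hx => ⟨x, hx, Relation.ReflTransGen.refl⟩, ?_⟩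
      intro u hu w hw
      apply (hmem w).mp
      rw [pv_mem_grow]
      rcases hw with h | h
      · exact Or.inr ⟨(u, w), h, Or.inl hu, Or.inr rfl⟩
      · exact Or.inr ⟨(w, u), h, Or.inr hu, Or.inl rfl⟩

    · rw [if_neg heq]
      have hgsub : ∀ x ∈ comp, x ∈ pvGrow edges comp := fun x hx => (pv_mem_grow ..).mpr (Or.inl hx)
      have hx : ∃ x, x ∈ pvGrow edges comp ∧ x ∉ comp := by
        by_contra hcon
        push_neg at hcon
        exact heq ((PySem.Set.equal_iff _ _).mpr (fun x => ⟨fun h => hcon x h, hgsub x⟩))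
      obtain ⟨x, hxg, hxc⟩ := hx
      have hgV : ∀ y ∈ pvGrow edges comp, y ∈ V := by
        intro y hy
        rcases (pv_mem_grow ..).mp hy with h | ⟨e, he, _, hx'⟩
        · exact hV y h
        · rcases hx' with rfl | rfl
          · exact (hEnds e he).1
          · exact (hEnds e he).2
      have hfuel' : (V.filter (fun y => decide (y ∉ pvGrow edges comp))).length < fuel := by
        have : (V.filter (fun y => decide (y ∉ pvGrow edges comp))).length
            < (V.filter (fun y => decide (y ∉ comp))).length := by
          refine pv_filter_strict V (fun y => y ∉ comp) (fun y => y ∉ pvGrow edges comp)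
            (fun y hy h => hy (hgsub y h)) x (hgV x hxg) hxc (by simp [hxg])
        omega
      obtain ⟨g1, g2, g3, g4, g5⟩ := ih (pvGrow edges comp) (pv_nodup_grow _ _ hnd) hgV hfuel'
      refine ⟨fun y hy => g1 y (hgsub y hy), g2, g3, ?_, g5⟩
      intro y hy
      obtain ⟨z, hz, hr⟩ := g4 y hy
      rcases (pv_mem_grow ..).mp hz with h | ⟨e, he, hc, hx'⟩
      · exact ⟨z, h, hr⟩
      · rcases hx' with rfl | rfl
        · rcases hc with h | h
          · exact ⟨e.1, h, hr⟩
          · exact ⟨e.2, h, Relation.ReflTransGen.head (Or.inr (by simpa using he)) hr⟩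
        · rcases hc with h | h
          · exact ⟨e.1, h, Relation.ReflTransGen.head (Or.inl (by simpa using he)) hr⟩
          · exact ⟨e.2, h, hr⟩

-- a saturated set of reachable vertices contains every vertex reachable from a member
theorem pv_reach_mem (r : Int → Int → Prop) (S : List Int) (s : Int)
    (hs : s ∈ S) (hsat : ∀ u ∈ S, ∀ w, r u w → w ∈ S) :
    ∀ x, Relation.ReflTransGen r s x → x ∈ S := by
  intro x h
  induction h with
  | refl => exact hs
  | tail _ h₂ ih => exact hsat _ ih _ h₂

-- |S| = |V| for a nodup subset S of a nodup V iff S covers V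
theorem pv_len_eq_iff_all (S V : List Int) (hS : S.Nodup) (hV : V.Nodup)
    (hsub : ∀ x ∈ S, x ∈ V) :
    S.length = V.length ↔ ∀ x ∈ V, x ∈ S := by
  constructor
  · intro h
    have hperm : S.Perm V := (hS.subperm (fun x hx => hsub x hx)).perm_of_length_le (by omega)
    intro x hx; exact hperm.mem_iff.mpr hx
  · intro h
    exact ((List.perm_ext_iff_of_nodup hS hV).mpr
      (fun a => ⟨fun ha => hsub a ha, fun ha => h a ha⟩)).length_eq

theorem pv_any_congr (l₁ l₂ : List Int) (p : Int → Bool) (h : ∀ x, x ∈ l₁ ↔ x ∈ l₂) :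
    l₁.any p = l₂.any p := by
  by_cases hb : l₁.any p = true
  · rw [hb]; symm; rw [List.any_eq_true] at hb ⊢
    obtain ⟨x, hx, hpx⟩ := hb; exact ⟨x, (h x).mp hx, hpx⟩
  · rw [Bool.not_eq_true] at hb; rw [hb]; symm
    rw [Bool.eq_false_iff]; intro hc
    rw [List.any_eq_true] at hc
    obtain ⟨x, hx, hpx⟩ := hc
    exact (Bool.eq_false_iff.mp hb) (List.any_eq_true.mpr ⟨x, (h x).mpr hx, hpx⟩)

-- under Pre_, the members of opp = [x for x in face if x != vertex] are exactly the two
-- components of the link edge read off from sorted(opp)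
theorem pv_linkEdge_mem (vertex : Int) (face : List Int)
    (h : (face.filter (fun x => x != vertex)).length = 2) (x : Int) :
    x ∈ face.filter (fun x => x != vertex)
      ↔ x = (pvLinkEdge vertex face).1 ∨ x = (pvLinkEdge vertex face).2 := by
  have hp := PySem.List.sorted_perm (face.filter (fun x => x != vertex)) (fun x => x) false
  have hl : (PySem.List.sorted (face.filter (fun x => x != vertex)) (fun x => x) false).length = 2 := by
    rw [PySem.List.length_sorted]; exact h
  rcases List.length_eq_two.mp hl with ⟨a, b, hab⟩
  unfold pvLinkEdge
  rw [← hp.mem_iff, hab]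
  simp


theorem pv_any_fun_congr (l : List Int) (p q : Int → Bool) (h : ∀ x ∈ l, p x = q x) :
    l.any p = l.any q := by
  induction l with
  | nil => rfl
  | cons a t ih =>
    simp only [List.any_cons]
    rw [h a (List.mem_cons_self ..), ih (fun x hx => h x (List.mem_cons_of_mem _ hx))]

-- the two degree tests agree: A's dict of counters over the vertex set versus B's counting sums
theorem pv_deg_cond (eds : List (Int × Int)) (lvs : PySem.Set Int)
    (hmem : ∀ x, x ∈ lvs ↔ x ∈ eds.flatMap (fun e => [e.1, e.2])) :
    (List.foldl (fun d x => d.modify x 0 (· + 1))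
        (List.foldl (fun d v => d.insert v (0 : Int)) PySem.Dict.empty lvs)
        (eds.flatMap (fun e => [e.1, e.2]))).values.any (fun d => d != 2)
      = (PySem.Set.ofList (eds.flatMap (fun e => [e.1, e.2]))).any
          (fun v => ((eds.flatMap (fun e => [e.1, e.2])).map (fun x => if x = v then (1 : Int) else 0)).sum != 2) := by
  set P := eds.flatMap (fun e => [e.1, e.2]) with hP
  set deg0 := List.foldl (fun d v => d.insert v (0 : Int)) PySem.Dict.empty lvs with hdeg0
  set deg := List.foldl (fun d x => PySem.Dict.modify d x 0 (· + 1)) deg0 P with hdeg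
  have hek : (PySem.Dict.empty : PySem.Dict Int Int).keys = [] := rfl
  have hk0nd : deg0.keys.Nodup := by
    rw [hdeg0]
    exact PySem.Dict.nodup_keys_foldl_insert lvs (fun _ _ => 0) PySem.Dict.empty
      (by rw [hek]; exact List.nodup_nil)
  have hknd : deg.keys.Nodup := by
    rw [hdeg]
    exact PySem.Dict.nodup_keys_foldl_modify_key P (fun x => x) 0 (fun _ _ v => v + 1) deg0 hk0nd
  have hgetD : ∀ v, deg.getD v 0 = ((P.count v : Nat) : Int) := by
    intro v
    have h1 : deg.getD v 0 = deg0.getD v 0 + ((P.count v : Nat) : Int) := by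
      rw [hdeg]; exact PySem.Dict.getD_foldl_modify_add_one P deg0 v
    have h2 : deg0.getD v 0 = 0 := by
      rw [hdeg0]; exact pv_getD_foldl_insert_const lvs 0 PySem.Dict.empty v rfl
    rw [h1, h2, zero_add]
  have hkeys : ∀ x, x ∈ deg.keys ↔ x ∈ P := by
    intro x
    have h3 : deg.keys = PySem.Set.update deg0.keys P := by
      rw [hdeg]; exact PySem.Dict.keys_foldl_modify P 0 (fun _ _ v => v + 1) deg0
    have h4 : deg0.keys = PySem.Set.update (PySem.Dict.empty : PySem.Dict Int Int).keys lvs := by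
      rw [hdeg0]; exact PySem.Dict.keys_foldl_insert lvs (fun _ _ => 0) PySem.Dict.empty
    rw [h3, PySem.Set.mem_update, h4, PySem.Set.mem_update, hek]
    simp only [List.not_mem_nil, false_or]
    constructor
    · rintro (h | h)
      · exact (hmem x).mp h
      · exact h
    · exact fun h => Or.inr h
  have hvals : deg.values = deg.keys.map (fun k => deg.getD k 0) :=
    PySem.Dict.values_eq_map_keys deg hknd 0
  rw [hvals, List.any_map]
  have hsum : ∀ v : Int, (P.map (fun x => if x = v then (1 : Int) else 0)).sum = ((P.count v : Nat) : Int) := by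
    intro v
    have hfe : (fun x : Int => if x = v then (1 : Int) else 0)
        = (fun x : Int => if (x == v) = true then (1 : Int) else 0) := by
      funext x; by_cases h : x = v <;> simp [h]
    rw [hfe, PySem.List.sum_map_ite_one_zero, List.count_eq_countP]
  have hA2 : ∀ x ∈ deg.keys, ((fun d => d != 2) ∘ fun k => deg.getD k 0) x
      = (fun v => (((P.count v : Nat) : Int) != 2)) x := by
    intro x _
    simp only [Function.comp]
    rw [hgetD x]
  rw [pv_any_fun_congr deg.keys _ _ hA2]
  have hB2 : ∀ x ∈ PySem.Set.ofList P,
      (fun v => ((P.map (fun x => if x = v then (1 : Int) else 0)).sum != 2)) x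
        = (fun v => (((P.count v : Nat) : Int) != 2)) x := by
    intro x _
    simp only []
    rw [hsum x]
  rw [pv_any_fun_congr (PySem.Set.ofList P) _ _ hB2]
  exact pv_any_congr deg.keys (PySem.Set.ofList P) _
    (fun x => (hkeys x).trans (PySem.Set.mem_ofList P x).symm)

-- the two connectivity verdicts agree: A's DFS component and B's closure component are both the
-- set of vertices reachable from their respective start, and coverage of the vertex set by either
-- is equivalent to connectivity
theorem pv_conn (eds : List (Int × Int)) (start : Int) (rest : List Int) (e0 : Int × Int)
    (erest : List (Int × Int)) (adjd : PySem.Dict Int (List Int))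
    (hAdj : ∀ u w, w ∈ adjd.getD u [] ↔ pvAdjP eds u w)
    (hed : eds = e0 :: erest)
    (hVnd : (start :: rest : List Int).Nodup)
    (hmem : ∀ x, x ∈ (start :: rest : List Int) ↔ x ∈ eds.flatMap (fun e => [e.1, e.2])) :
    decide ((pvDfsA adjd (start :: rest : List Int).length [start] (PySem.Set.add PySem.Set.empty start)).length
        = (start :: rest : List Int).length)
      = decide ((pvLoop eds (PySem.Set.ofList (eds.flatMap (fun e => [e.1, e.2]))).length
            (PySem.Set.add PySem.Set.empty e0.1)).length
          = (PySem.Set.ofList (eds.flatMap (fun e => [e.1, e.2]))).length) := by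
  have hmemadd : ∀ z y : Int, y ∈ PySem.Set.add PySem.Set.empty z ↔ y = z := by
    intro z y
    rw [PySem.Set.mem_add]
    constructor
    · rintro (h | h)
      · exact absurd h (List.not_mem_nil)
      · exact h
    · exact fun h => Or.inr h
  have hndadd : ∀ z : Int, (PySem.Set.add PySem.Set.empty z).Nodup :=
    fun z => PySem.Set.nodup_add _ _ List.nodup_nil
  have he0eds : e0 ∈ eds := by rw [hed]; exact List.mem_cons_self ..
  have he0P : e0.1 ∈ eds.flatMap (fun e => [e.1, e.2]) :=
    List.mem_flatMap.mpr ⟨e0, he0eds, by simp⟩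
  have hstartV : start ∈ (start :: rest : List Int) := List.mem_cons_self ..
  have hAdjV : ∀ u w, w ∈ adjd.getD u [] → w ∈ (start :: rest : List Int) := by
    intro u w hw
    rcases (hAdj u w).mp hw with h | h
    · exact (hmem w).mpr (List.mem_flatMap.mpr ⟨(u, w), h, by simp⟩)
    · exact (hmem w).mpr (List.mem_flatMap.mpr ⟨(w, u), h, by simp⟩)
  have hEnds : ∀ e ∈ eds, e.1 ∈ (start :: rest : List Int) ∧ e.2 ∈ (start :: rest : List Int) := by
    intro e he
    exact ⟨(hmem e.1).mpr (List.mem_flatMap.mpr ⟨e, he, by simp⟩),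
           (hmem e.2).mpr (List.mem_flatMap.mpr ⟨e, he, by simp⟩)⟩
  have hlen : (PySem.Set.ofList (eds.flatMap (fun e => [e.1, e.2]))).length
      = (start :: rest : List Int).length :=
    (((List.perm_ext_iff_of_nodup (PySem.Set.nodup_ofList _) hVnd).mpr
      (fun a => (PySem.Set.mem_ofList _ a).trans (hmem a).symm))).length_eq
  have hstartseed : start ∈ PySem.Set.add PySem.Set.empty start := (hmemadd start start).mpr rfl
  have he0seed : e0.1 ∈ PySem.Set.add PySem.Set.empty e0.1 := (hmemadd _ _).mpr rfl
  obtain ⟨a1, a2, a3, a4, a5⟩ :=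
    pvDfsA_spec adjd (start :: rest) hAdjV (start :: rest).length [start]
      (PySem.Set.add PySem.Set.empty start)
      (hndadd start)
      (by intro x hx
          have hx' : x = start := by simpa using hx
          subst hx'; exact hstartseed)
      (by intro x hx
          have hx' : x = start := (hmemadd start x).mp hx
          subst hx'; exact hstartV)
      (by intro u hu hust
          have hu' : u = start := (hmemadd start u).mp hu
          subst hu'
          exact fun w hw => absurd (List.mem_cons_self ..) hust)
      (by have hf : (List.filter (fun x => decide (x ∉ PySem.Set.add PySem.Set.empty start)) (start :: rest)).length
              ≤ rest.length := by
            rw [List.filter_cons, if_neg (by simpa using hstartseed)]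
            exact List.length_filter_le _ _
          simp only [List.length_cons, List.length_nil]
          omega)
  obtain ⟨b1, b2, b3, b4, b5⟩ :=
    pvLoop_spec eds (start :: rest) hEnds
      (PySem.Set.ofList (eds.flatMap (fun e => [e.1, e.2]))).length
      (PySem.Set.add PySem.Set.empty e0.1)
      (hndadd e0.1)
      (by intro x hx
          have hx' : x = e0.1 := (hmemadd _ x).mp hx
          subst hx'; exact (hmem e0.1).mpr he0P)
      (by rw [hlen]
          exact List.length_filter_lt_length_iff_exists.mpr
            ⟨e0.1, (hmem e0.1).mpr he0P, by simpa using he0seed⟩)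
  set SA := pvDfsA adjd (start :: rest).length [start] (PySem.Set.add PySem.Set.empty start) with hSA
  set SB := pvLoop eds (PySem.Set.ofList (eds.flatMap (fun e => [e.1, e.2]))).length
      (PySem.Set.add PySem.Set.empty e0.1) with hSB
  have hSAiff : ∀ x, x ∈ SA ↔ Relation.ReflTransGen (pvAdjP eds) start x := by
    intro x
    constructor
    · intro hx
      obtain ⟨y, hy, hr⟩ := a4 x hx
      have hy' : y = start := (hmemadd start y).mp hy
      subst hy'
      exact Relation.ReflTransGen.mono (fun u w h => (hAdj u w).mp h) hr
    · intro hr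
      exact pv_reach_mem (pvAdjP eds) SA start (a1 start hstartseed)
        (fun u hu w hw => a5 u hu w ((hAdj u w).mpr hw)) x hr
  have hSBiff : ∀ x, x ∈ SB ↔ Relation.ReflTransGen (pvAdjP eds) e0.1 x := by
    intro x
    constructor
    · intro hx
      obtain ⟨y, hy, hr⟩ := b4 x hx
      have hy' : y = e0.1 := (hmemadd _ y).mp hy
      subst hy'
      exact hr
    · intro hr
      exact pv_reach_mem (pvAdjP eds) SB e0.1 (b1 e0.1 he0seed) b5 x hr
  have hsymC : ∀ {u w : Int}, Relation.ReflTransGen (pvAdjP eds) u w →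
      Relation.ReflTransGen (pvAdjP eds) w u :=
    fun h => Relation.ReflTransGen.symmetric (fun u w hc => pvAdjP_symm eds u w hc) h
  rw [hlen, decide_eq_decide,
    pv_len_eq_iff_all SA (start :: rest) a2 hVnd a3,
    pv_len_eq_iff_all SB (start :: rest) b2 hVnd b3]
  constructor
  · intro h x hx
    refine (hSBiff x).mpr ?_
    have h1 := (hSAiff e0.1).mp (h e0.1 ((hmem e0.1).mpr he0P))
    have h2 := (hSAiff x).mp (h x hx)
    exact Relation.ReflTransGen.trans (hsymC h1) h2
  · intro h x hx
    refine (hSAiff x).mpr ?_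
    have h1 := (hSBiff start).mp (h start hstartV)
    have h2 := (hSBiff x).mp (h x hx)
    exact Relation.ReflTransGen.trans (hsymC h1) h2

-- the loop over faces builds the edge list and the vertex set independently
theorem pv_split (vertex : Int) (faces : List (List Int)) (acc1 : List (Int × Int))
    (acc2 : PySem.Set Int) :
    List.foldl (fun (st : List (Int × Int) × PySem.Set Int) face =>
        (st.1 ++ [pvLinkEdge vertex face], PySem.Set.update st.2 (face.filter (fun x => x != vertex))))
      (acc1, acc2) faces
    = (acc1 ++ List.map (fun face => pvLinkEdge vertex face) faces,
       List.foldl (fun s face => PySem.Set.update s (face.filter (fun x => x != vertex))) acc2 faces) := by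
  induction faces generalizing acc1 acc2 with
  | nil => simp
  | cons f fss ih => simp [ih]

-- the whole equivalence on a nonempty face list
theorem pv_core (vertex : Int) (f0 : List Int) (fs : List (List Int))
    (hPre : ∀ face ∈ (f0 :: fs : List (List Int)), (face.filter (fun x => x != vertex)).length = 2) :
    vertex_link_is_disk vertex (f0 :: fs) = vertex_link_is_disk_alt vertex (f0 :: fs) := by
  have hne : (f0 :: fs : List (List Int)) ≠ [] := List.cons_ne_nil f0 fs
  simp only [vertex_link_is_disk, vertex_link_is_disk_alt]
  rw [if_neg hne, if_neg hne]
  rw [pv_split vertex (f0 :: fs) [] PySem.Set.empty]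
  dsimp only
  simp only [List.nil_append]
  -- membership of link_verts = membership of the endpoint list
  have hmemlvs : ∀ x : Int, x ∈ (List.foldl (fun s face => PySem.Set.update s (face.filter (fun x => x != vertex))) PySem.Set.empty (f0 :: fs)) ↔ x ∈ (List.map (fun face => pvLinkEdge vertex face) (f0 :: fs)).flatMap (fun e => [e.1, e.2]) := by
    intro x
    have h1 := pv_mem_foldl_update (f0 :: fs) (fun f => f.filter (fun x => x != vertex))
      PySem.Set.empty x
    constructor
    · intro hx
      rcases h1.mp hx with hemp | ⟨f, hf, hxf⟩
      · exact absurd hemp List.not_mem_nil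
      · rcases (pv_linkEdge_mem vertex f (hPre f hf) x).mp hxf with h | h
        · exact List.mem_flatMap.mpr ⟨pvLinkEdge vertex f, List.mem_map.mpr ⟨f, hf, rfl⟩, by simp [h]⟩
        · exact List.mem_flatMap.mpr ⟨pvLinkEdge vertex f, List.mem_map.mpr ⟨f, hf, rfl⟩, by simp [h]⟩
    · intro hx
      obtain ⟨e, he, hxe⟩ := List.mem_flatMap.mp hx
      obtain ⟨f, hf, rfl⟩ := List.mem_map.mp he
      refine h1.mpr (Or.inr ⟨f, hf, (pv_linkEdge_mem vertex f (hPre f hf) x).mpr ?_⟩)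
      simpa using hxe
  simp only [pv_deg_fold_eq, pv_adj_fold_eq]
  simp only [pv_deg_cond (List.map (fun face => pvLinkEdge vertex face) (f0 :: fs)) (List.foldl (fun s face => PySem.Set.update s (face.filter (fun x => x != vertex))) PySem.Set.empty (f0 :: fs)) hmemlvs]
  by_cases hC : (PySem.Set.ofList ((List.map (fun face => pvLinkEdge vertex face) (f0 :: fs)).flatMap (fun e => [e.1, e.2]))).any
      (fun v => (((List.map (fun face => pvLinkEdge vertex face) (f0 :: fs)).flatMap (fun e => [e.1, e.2])).map (fun x => if x = v then (1 : Int) else 0)).sum != 2) = true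
  · rw [if_pos hC, if_pos hC]
  · rw [if_neg hC, if_neg hC]
    have hNodupLvs : ((List.foldl (fun s face => PySem.Set.update s (face.filter (fun x => x != vertex))) PySem.Set.empty (f0 :: fs)) : PySem.Set Int).Nodup :=
      pv_nodup_foldl_update (f0 :: fs) (fun f => f.filter (fun x => x != vertex))
        PySem.Set.empty List.nodup_nil
    have h2 := hPre f0 (List.mem_cons_self ..)
    have hne2 : f0.filter (fun x => x != vertex) ≠ [] := by
      intro h
      rw [h] at h2
      simp at h2
    obtain ⟨a, ha⟩ := List.exists_mem_of_ne_nil _ hne2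
    have halvs : a ∈ (List.foldl (fun s face => PySem.Set.update s (face.filter (fun x => x != vertex))) PySem.Set.empty (f0 :: fs)) :=
      (pv_mem_foldl_update (f0 :: fs) (fun f => f.filter (fun x => x != vertex))
        PySem.Set.empty a).mpr (Or.inr ⟨f0, List.mem_cons_self .., ha⟩)
    obtain ⟨start, rest, hlv⟩ : ∃ s r, (List.foldl (fun s face => PySem.Set.update s (face.filter (fun x => x != vertex))) PySem.Set.empty (f0 :: fs)) = s :: r := by
      cases h : ((List.foldl (fun s face => PySem.Set.update s (face.filter (fun x => x != vertex))) PySem.Set.empty (f0 :: fs)) : PySem.Set Int) with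
      | nil => rw [h] at halvs; cases halvs
      | cons s r => exact ⟨s, r, rfl⟩
    rw [hlv]
    have hVnd : (start :: rest : List Int).Nodup := by rw [← hlv]; exact hNodupLvs
    have hmem' : ∀ x, x ∈ (start :: rest : List Int) ↔ x ∈ (List.map (fun face => pvLinkEdge vertex face) (f0 :: fs)).flatMap (fun e => [e.1, e.2]) := by
      rw [← hlv]; exact hmemlvs
    have h0 : ∀ u, ((List.foldl (fun d v => d.insert v ([] : List Int)) PySem.Dict.empty (start :: rest)) : PySem.Dict Int (List Int)).getD u [] = [] :=
      fun u => pv_getD_foldl_insert_const (start :: rest) [] PySem.Dict.empty u rfl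
    exact pv_conn (List.map (fun face => pvLinkEdge vertex face) (f0 :: fs)) start rest (pvLinkEdge vertex f0)
      (List.map (fun face => pvLinkEdge vertex face) fs)
      (((List.map (fun face => pvLinkEdge vertex face) (f0 :: fs)).flatMap (fun e => [(e.1, e.2), (e.2, e.1)])).foldl (fun d p => d.modify p.1 [] (· ++ [p.2])) (List.foldl (fun d v => d.insert v ([] : List Int)) PySem.Dict.empty (start :: rest)))
      (pv_mem_adj (List.map (fun face => pvLinkEdge vertex face) (f0 :: fs)) (List.foldl (fun d v => d.insert v ([] : List Int)) PySem.Dict.empty (start :: rest)) h0) rfl hVnd hmem'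

-- ===== VERDICT (by name: the statement is the Claim_ definition above) =====
theorem vertex_link_is_disk_spec : Claim_equal_vertex_link_is_disk := by
  intro vertex faces _hDom hPre
  unfold Spec_vertex_link_is_disk
  cases faces with
  | nil => rfl
  | cons f0 fs => exact pv_core vertex f0 fs hPre
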